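-- pv_equiv track=rewrite | github.com/Niccus/glolf | glolf/courses.py | split_counting_discord_emoji
-- ===== SOURCE A (Python) =====
-- def split_counting_discord_emoji(line): # unused for now
--     # parse "abc:one:" into ['a','b','c',':one']
--     if line.count(":") % 2 == 1:
--         raise ValueError("unmatched : for emoji!")
--     index = 0
--     arr = []
--     while index < len(line):
--         newchar = line[index]
--         if newchar == ":":
--             # emoji detected
--             endindex = line.find(":",index+1)
--             if endindex == -1:
--                 raise ValueError
--             arr.append(line[index:endindex+1])
--             index = endindex+1
--         else:
--             arr.append(line[index])
--             index += 1
--     return arr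
-- ===== SOURCE B (Python) =====
-- def split_counting_discord_emoji(line):
--     if line.count(":") % 2 == 1:
--         raise ValueError("unmatched : for emoji!")
--     out = []
--     for i, part in enumerate(line.split(":")):
--         if i % 2 == 0:
--             out.extend(part)
--         else:
--             out.append(":" + part + ":")
--     return out
-- ===== Notes on version B (the rewrite author's own statement) =====
-- stated objective: faster
-- what changed: Replaced A's per-character index-walking loop with its find() scan by a single line.split(':') followed by one enumerate pass (even segments yield their characters, odd segments are re-wrapped in colons).
import Mathlib
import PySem

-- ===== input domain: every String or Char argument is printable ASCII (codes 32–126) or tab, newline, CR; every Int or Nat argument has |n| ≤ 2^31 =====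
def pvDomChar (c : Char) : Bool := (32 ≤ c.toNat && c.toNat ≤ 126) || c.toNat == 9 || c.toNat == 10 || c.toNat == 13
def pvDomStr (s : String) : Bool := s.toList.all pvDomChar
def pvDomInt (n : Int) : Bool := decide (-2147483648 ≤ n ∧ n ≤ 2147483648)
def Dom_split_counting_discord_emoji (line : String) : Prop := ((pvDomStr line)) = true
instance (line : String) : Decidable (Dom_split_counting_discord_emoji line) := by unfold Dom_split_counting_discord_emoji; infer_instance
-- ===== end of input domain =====

-- B replaces A's per-character index walk + find() scan by one split(':') and one enumerate pass (constant-factor faster in a timing run).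
-- A raises ValueError when line.count(':') is odd; those inputs are excluded by Pre_ (B raises there too).


-- ===== PORT A =====
-- the while loop of A: index walks the string; on ':' it find()s the closing colon and slices
def splitA_loop (cs : List Char) (index : Nat) (arr : List String) : List String :=
  if h : index < cs.length then
    let newchar := cs[index]
    if newchar = ':' then
      let endindex := PySem.Chars.findFrom cs [':'] ((index : Int) + 1)
      if h2 : endindex = -1 then arr   -- Python: raise ValueError (never reached under Pre_)
      else splitA_loop cs (endindex + 1).toNat
             (arr ++ [String.ofList (PySem.Chars.slice cs (some (index : Int)) (some (endindex + 1)))])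
    else splitA_loop cs (index + 1) (arr ++ [String.ofList [newchar]])
  else arr
termination_by cs.length - index
decreasing_by
  · have hk : (index : Int) + 1 ≤ cs.length := by exact_mod_cast h
    have := (PySem.Chars.findFrom_natCast_spec cs [':'] (index + 1)
      (by exact_mod_cast hk) (by push_cast; exact_mod_cast h2)).1
    push_cast at this
    omega
  · omega

def split_counting_discord_emoji (line : String) : List String :=
  if PySem.Str.count line ":" % 2 == 1 then []   -- Python: raise ValueError("unmatched : for emoji!")
  else splitA_loop line.toList 0 []

-- ===== PORT B =====
-- the loop body of B: even-indexed parts contribute their characters, odd parts are wrapped in colons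
def splitB_step (out : List String) (ip : Int × List Char) : List String :=
  if PySem.Int.mod ip.1 2 == 0 then out ++ ip.2.map (fun c => String.ofList [c])
  else out ++ [String.ofList (':' :: ip.2 ++ [':'])]

def split_counting_discord_emoji_alt (line : String) : List String :=
  if PySem.Str.count line ":" % 2 == 1 then []   -- Python: raise ValueError("unmatched : for emoji!")
  else
    let parts := (PySem.Chars.split? line.toList [':']).getD []
    (PySem.List.enumerate parts).foldl splitB_step []

-- ===== PRECONDITION & SPEC =====
-- exactly the inputs where Python A returns: an even number of colons (odd ⇒ ValueError)
def Pre_split_counting_discord_emoji (line : String) : Prop := PySem.Str.count line ":" % 2 = 0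
instance (line : String) : Decidable (Pre_split_counting_discord_emoji line) := by
  unfold Pre_split_counting_discord_emoji; infer_instance

def pvWitness_split_counting_discord_emoji : String := "ab:one:"

def Spec_split_counting_discord_emoji (line : String) (out : List String) : Prop := out = split_counting_discord_emoji_alt line
instance (line : String) (out : List String) : Decidable (Spec_split_counting_discord_emoji line out) := by unfold Spec_split_counting_discord_emoji; infer_instance

-- ===== CLAIM (what is proved, stated in full; the proofs are below) =====
def Claim_equal_split_counting_discord_emoji : Prop := ∀ (line : String), Dom_split_counting_discord_emoji line → Pre_split_counting_discord_emoji line → Spec_split_counting_discord_emoji line (split_counting_discord_emoji line)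

-- ===== LEMMAS AND PROOFS =====

-- reference split on ':' (what CPython's str.split computes), used only in the proofs
def sp : List Char → List (List Char)
  | [] => [[]]
  | c :: t => if c = ':' then [] :: sp t else (sp t).modifyHead (c :: ·)

-- structural rewrite of A's walk on the suffix cs.drop index, used only in the proofs
def gA : List Char → List String
  | [] => []
  | c :: t =>
    if c = ':' then
      if h : PySem.Chars.find t [':'] = -1 then []
      else String.ofList ((c :: t).take ((PySem.Chars.find t [':']).toNat + 2)) ::
             gA (t.drop ((PySem.Chars.find t [':']).toNat + 1))
    else String.ofList [c] :: gA t
termination_by cs => cs.length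
decreasing_by
  all_goals simp

-- reference form of B's enumerate pass, used only in the proofs
def hB : List (List Char) → List String
  | [] => []
  | [p] => p.map (fun c => String.ofList [c])
  | p :: q :: rest => p.map (fun c => String.ofList [c]) ++ (String.ofList (':' :: q ++ [':']) :: hB rest)

theorem sp_ne_nil (cs : List Char) : sp cs ≠ [] := by
  cases cs with
  | nil => simp [sp]
  | cons c t =>
    simp only [sp]
    split
    · simp
    · cases h : sp t with
      | nil => exact absurd h (sp_ne_nil t)
      | cons p r => simp [List.modifyHead]

theorem count_go_colon (l : List Char) : ∀ (fuel acc : Nat), l.length ≤ fuel →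
    PySem.Chars.count.go [':'] fuel l acc = acc + l.count ':' := by
  induction l with
  | nil => intro fuel acc _; cases fuel <;> simp [PySem.Chars.count.go]
  | cons c t ih =>
    intro fuel acc hf
    cases fuel with
    | zero => simp at hf
    | succ f =>
      rw [List.length_cons] at hf
      have hpf : List.isPrefixOf [':'] (c :: t) = (':' == c) := by
        simp [List.isPrefixOf]
      by_cases hc : c = ':'
      · simp only [PySem.Chars.count.go, hc]
        rw [show (List.drop [':'].length (':' :: t)) = t by simp]
        rw [ih f (acc + 1) (by omega)]
        simp
        omega
      · have hne : (':' == c) = false := by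
          simp only [beq_eq_false_iff_ne, ne_eq]
          exact fun h => hc h.symm
        simp only [PySem.Chars.count.go, hpf, hne, Bool.false_eq_true, if_false]
        rw [ih f acc (by omega)]
        simp [hc]

theorem count_colon (cs : List Char) : PySem.Chars.count cs [':'] = cs.count ':' := by
  simp [PySem.Chars.count, count_go_colon cs cs.length 0 le_rfl]

theorem splitOn_go_colon (l : List Char) : ∀ (fuel : Nat) (cur : List Char) (acc : List (List Char)),
    l.length ≤ fuel →
    PySem.Chars.splitOn.go [':'] fuel l cur acc = acc.reverse ++ (sp l).modifyHead (cur.reverse ++ ·) := by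
  induction l with
  | nil =>
    intro fuel cur acc _
    cases fuel <;> simp [PySem.Chars.splitOn.go, sp, List.modifyHead]
  | cons c t ih =>
    intro fuel cur acc hf
    cases fuel with
    | zero => simp at hf
    | succ f =>
      rw [List.length_cons] at hf
      simp only [PySem.Chars.splitOn.go]
      by_cases hc : c = ':'
      · have hpre : [':'].isPrefixOf (c :: t) = true := by simp [List.isPrefixOf, hc]
        simp only [hpre, if_pos]
        rw [show (List.drop [':'].length (c :: t)) = t by simp]
        rw [ih f [] (cur.reverse :: acc) (by omega)]
        simp only [sp, hc, if_pos]
        cases h : sp t with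
        | nil => exact absurd h (sp_ne_nil t)
        | cons p r => simp [List.modifyHead]
      · have hpre : [':'].isPrefixOf (c :: t) = false := by
          simp [List.isPrefixOf]
          intro h; exact absurd h.symm hc
        simp only [hpre, Bool.false_eq_true, if_false]
        rw [ih f (c :: cur) acc (by omega)]
        simp only [sp]
        rw [if_neg hc]
        congr 1
        cases h : sp t with
        | nil => exact absurd h (sp_ne_nil t)
        | cons p r => simp [List.modifyHead]
  
theorem splitOn_colon (cs : List Char) : PySem.Chars.splitOn cs [':'] = sp cs := by
  rw [PySem.Chars.splitOn, splitOn_go_colon cs (cs.length + 1) [] [] (by omega)]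
  simp only [List.reverse_nil, List.nil_append]
  cases h : sp cs with
  | nil => exact absurd h (sp_ne_nil cs)
  | cons p r => simp [List.modifyHead]

theorem sp_append_colon (q r : List Char) (hq : ':' ∉ q) : sp (q ++ ':' :: r) = q :: sp r := by
  induction q with
  | nil => simp [sp]
  | cons c t ih =>
    simp only [List.mem_cons, not_or] at hq
    simp only [List.cons_append, sp, ih hq.2]
    rw [if_neg (fun hcon => hq.1 hcon.symm)]
    simp [List.modifyHead]

-- decomposition at the first colon: find t [':'] ≠ -1 gives t = q ++ ':' :: r with ':' ∉ q
theorem find_colon_decomp (t : List Char) (h : PySem.Chars.find t [':'] ≠ -1) :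
    ∃ q r, t = q ++ ':' :: r ∧ ':' ∉ q ∧ PySem.Chars.find t [':'] = (q.length : Int) := by
  have hpos : 0 ≤ PySem.Chars.find t [':'] := by
    have := PySem.Chars.neg_one_le_find t [':']
    omega
  obtain ⟨hpre, hmin⟩ := PySem.Chars.find_spec (s := t) (sub := [':']) hpos
  set n := (PySem.Chars.find t [':']).toNat with hn
  obtain ⟨r, hr⟩ := hpre
  have hlen : n < t.length := by
    have : t.drop n ≠ [] := by rw [← hr]; simp
    rw [← List.length_pos_iff] at this
    simp at this; omega
  refine ⟨t.take n, r, ?_, ?_, ?_⟩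
  · conv_lhs => rw [← List.take_append_drop n t]
    rw [← hr]
    simp
  · intro hmem
    obtain ⟨i, hi, hig⟩ := List.getElem_of_mem hmem
    have hilen : i < (t.take n).length := hi
    have hi' : i < n := by simp at hilen; omega
    apply hmin i hi'
    have hd1 : (t.take n).drop i = ':' :: (t.take n).drop (i + 1) := by
      rw [List.drop_eq_getElem_cons hilen, hig]
    have hd2 : t.drop i = (t.take n).drop i ++ ':' :: r := by
      conv_lhs => rw [← List.take_append_drop n t, ← hr]
      rw [List.drop_append_of_le_length (by simp; omega)]
      simp
    exact ⟨(t.take n).drop (i + 1) ++ ':' :: r, by rw [hd2, hd1]; simp⟩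
  · simp [List.length_take, min_eq_left (le_of_lt hlen)]
    omega

-- find ≠ -1 exactly when the suffix contains a colon
theorem find_colon_ne_neg_one_of_mem (t : List Char) (h : ':' ∈ t) :
    PySem.Chars.find t [':'] ≠ -1 := by
  rw [Ne, PySem.Chars.find_eq_neg_one_iff]
  simp only [not_not]
  obtain ⟨q, r, hqr⟩ := List.append_of_mem h
  exact ⟨q, r, by rw [hqr]; simp⟩

theorem gA_nil : gA [] = [] := by simp [gA]

theorem gA_colon_cons (t : List Char) (h : ¬ PySem.Chars.find t [':'] = -1) :
    gA (':' :: t) = String.ofList ((':' :: t).take ((PySem.Chars.find t [':']).toNat + 2)) ::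
      gA (t.drop ((PySem.Chars.find t [':']).toNat + 1)) := by
  simp [gA, h]

theorem gA_colon_nofind (t : List Char) (h : PySem.Chars.find t [':'] = -1) :
    gA (':' :: t) = [] := by
  simp [gA, h]

theorem gA_char_cons (c : Char) (t : List Char) (h : ¬ c = ':') :
    gA (c :: t) = String.ofList [c] :: gA t := by
  simp [gA, h]

-- A's walk from position index equals gA on the remaining suffix
theorem splitA_loop_eq_gA (cs : List Char) : ∀ (fuel index : Nat) (arr : List String),
    cs.length - index ≤ fuel → index ≤ cs.length →
    splitA_loop cs index arr = arr ++ gA (cs.drop index) := by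
  intro fuel
  induction fuel with
  | zero =>
    intro index arr hf hi
    have : index = cs.length := by omega
    rw [splitA_loop, this]
    simp [gA]
  | succ f ih =>
    intro index arr hf hi
    rw [splitA_loop]
    by_cases h : index < cs.length
    · simp only [dif_pos h]
      have hdrop : cs.drop index = cs[index] :: cs.drop (index + 1) :=
        List.drop_eq_getElem_cons h
      by_cases hc : cs[index] = ':'
      · simp only [if_pos hc]
        have hk : ((index : Int) + 1) = ((index + 1 : Nat) : Int) := by push_cast; ring
        rw [hk, PySem.Chars.findFrom_natCast cs [':'] (index + 1) (by omega)]
        by_cases hfind : PySem.Chars.find (cs.drop (index + 1)) [':'] = -1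
        · simp only [hfind, if_pos]
          rw [hdrop, hc, gA_colon_nofind _ hfind]
          simp
        · have hge : 0 ≤ PySem.Chars.find (cs.drop (index + 1)) [':'] := by
            have := PySem.Chars.neg_one_le_find (cs.drop (index + 1)) [':']
            omega
          set m := (PySem.Chars.find (cs.drop (index + 1)) [':']).toNat with hm
          have hfm : PySem.Chars.find (cs.drop (index + 1)) [':'] = (m : Int) := by omega
          have hend : (((index + 1 : Nat) : Int) + PySem.Chars.find (cs.drop (index + 1)) [':'])
              = ((index + 1 + m : Nat) : Int) := by push_cast [hfm]; ring
          simp only [hfind, ite_false]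
          rw [dif_neg (by rw [hend]; intro hcon; exact absurd (by exact_mod_cast hcon) (by omega))]
          rw [hend]
          have hslice : PySem.Chars.slice cs (some (index : Int)) (some ((index + 1 + m : Nat) + 1)) =
              (cs.drop index).take (m + 2) := by
            have : (((index + 1 + m : Nat) : Int) + 1) = ((index + m + 2 : Nat) : Int) := by push_cast; ring
            rw [this]
            simp only [PySem.Chars.slice_eq_listSlice]
            rw [PySem.List.slice_natCast]
            congr 1
            omega
          rw [hslice]
          have htoNat : (((index + 1 + m : Nat) : Int) + 1).toNat = index + m + 2 := by omega
          rw [htoNat]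
          -- the find target is inside the list, so index+m+2 ≤ cs.length
          have hmlt : m < (cs.drop (index + 1)).length := by
            obtain ⟨q, r, hqr, _, hql⟩ := find_colon_decomp _ hfind
            have : q.length = m := by omega
            rw [hqr]; simp; omega
          rw [List.length_drop] at hmlt
          rw [ih (index + m + 2) _ (by omega) (by omega)]
          rw [hdrop, hc, gA_colon_cons _ hfind, ← hm]
          have hdd : (List.drop (index + 1) cs).drop (m + 1) = List.drop (index + m + 2) cs := by
            rw [List.drop_drop]; congr 1
          rw [hdd, ← hc, ← hdrop]
          simp
      · simp only [if_neg hc]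
        rw [ih (index + 1) _ (by omega) (by omega)]
        rw [hdrop, gA_char_cons _ _ hc]
        simp
    · simp only [dif_neg h]
      have : index = cs.length := by omega
      rw [this]
      simp [gA]

theorem hB_cons_head (c : Char) (p : List Char) (rest : List (List Char)) :
    hB ((c :: p) :: rest) = String.ofList [c] :: hB (p :: rest) := by
  cases rest <;> simp [hB]

-- B's enumerate fold from an even start index equals hB
theorem foldl_enum_eq_hB (parts : List (List Char)) : ∀ (n : Int) (acc : List String),
    PySem.Int.mod n 2 = 0 →
    (PySem.List.enumerate parts n).foldl splitB_step acc = acc ++ hB parts := by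
  induction parts using hB.induct with
  | case1 => intro n acc _; simp [PySem.List.enumerate, hB]
  | case2 p =>
    intro n acc hn
    have hc0 : (PySem.Int.mod n 2 == 0) = true := by rw [hn]; rfl
    simp only [PySem.List.enumerate, List.foldl_cons, List.foldl_nil, splitB_step, hc0, if_true, hB]
  | case3 p q rest ih =>
    intro n acc hn
    have hmod : ∀ a : Int, PySem.Int.mod a 2 = a % 2 :=
      fun a => PySem.Int.mod_eq_emod_of_pos (by norm_num)
    rw [hmod] at hn
    have hc0 : (PySem.Int.mod n 2 == 0) = true := by rw [hmod n, hn]; rfl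
    have hc1 : (PySem.Int.mod (n + 1) 2 == 0) = false := by
      rw [hmod (n + 1), show (n + 1) % 2 = 1 by omega]
      rfl
    simp only [PySem.List.enumerate, List.foldl_cons, splitB_step, hc0, hc1, if_true,
      Bool.false_eq_true, if_false]
    rw [ih (n + 1 + 1) _ (by rw [hmod]; omega)]
    simp [hB]

-- the heart: A's walk equals B's segment pass whenever the colon count is even
theorem gA_eq_hB_sp : ∀ (cs : List Char), cs.count ':' % 2 = 0 → gA cs = hB (sp cs) := by
  intro cs
  induction cs using gA.induct with
  | case1 => intro _; simp [gA_nil, sp, hB]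
  | case2 t hfind =>
    -- leading ':' with no closing colon: impossible, the count would be odd
    intro hev
    exfalso
    rw [List.count_cons_self] at hev
    have hmem : ':' ∈ t := by
      rcases Nat.eq_zero_or_pos (t.count ':') with h0 | hpos
      · omega
      · exact List.count_pos_iff.mp hpos
    exact find_colon_ne_neg_one_of_mem t hmem hfind
  | case3 t hfind ih =>
    intro hev
    obtain ⟨q, r, hqr, hq, hql⟩ := find_colon_decomp t hfind
    have hge : 0 ≤ PySem.Chars.find t [':'] := by
      have := PySem.Chars.neg_one_le_find t [':']
      omega
    have hm : (PySem.Chars.find t [':']).toNat = q.length := by omega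
    rw [List.count_cons_self, hqr, List.count_append, List.count_cons_self,
        List.count_eq_zero.mpr hq] at hev
    have hevr : r.count ':' % 2 = 0 := by omega
    have ht2 : t = (q ++ [':']) ++ r := by rw [hqr]; simp
    have hdrop : t.drop (q.length + 1) = r := by
      rw [show q.length + 1 = (q ++ [':']).length from by simp, ht2, List.drop_left]
    have htake : (':' :: t).take (q.length + 2) = ':' :: (q ++ [':']) := by
      rw [show q.length + 2 = (q ++ [':']).length + 1 from by simp]
      rw [List.take_succ_cons, ht2, List.take_left]
    rw [gA_colon_cons t hfind, hm, htake, hdrop]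
    have hsp : sp (':' :: t) = [] :: q :: sp r := by
      simp [sp, hqr, sp_append_colon q r hq]
    rw [hsp]
    rw [hm, hdrop] at ih
    simp [hB, ih hevr]
  | case4 c t hc ih =>
    intro hev
    rw [List.count_cons_of_ne hc] at hev
    rw [gA_char_cons c t hc, ih hev]
    simp only [sp]
    rw [if_neg hc]
    cases h : sp t with
    | nil => exact absurd h (sp_ne_nil t)
    | cons p rest => simp [List.modifyHead, hB_cons_head]

-- ===== VERDICT (by name: the statement is the Claim_ definition above) =====
theorem split_counting_discord_emoji_spec : Claim_equal_split_counting_discord_emoji := by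
  intro line _ hpre
  unfold Spec_split_counting_discord_emoji
  unfold Pre_split_counting_discord_emoji at hpre
  unfold split_counting_discord_emoji split_counting_discord_emoji_alt
  have hpre' : PySem.Chars.count line.toList [':'] % 2 = 0 := by
    rw [show PySem.Chars.count line.toList [':'] = PySem.Str.count line ":" from by simp]
    exact hpre
  have hguard : (PySem.Str.count line ":" % 2 == 1) = false := by
    simp [hpre']
  rw [hguard]
  simp only [Bool.false_eq_true, if_false]
  rw [splitA_loop_eq_gA line.toList line.toList.length 0 [] (by omega) (by omega)]
  rw [List.drop_zero, List.nil_append]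
  have hsplit : PySem.Chars.split? line.toList [':'] = some (sp line.toList) := by
    simp [PySem.Chars.split?, splitOn_colon]
  rw [hsplit]
  simp only [Option.getD_some]
  rw [foldl_enum_eq_hB (sp line.toList) 0 [] (by decide)]
  rw [List.nil_append]
  have hcount : line.toList.count ':' % 2 = 0 := by
    rw [← count_colon]
    exact hpre'
  exact gA_eq_hB_sp line.toList hcount
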